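-- pv_equiv track=rewrite | github.com/arita37/a_aapackage | aapackage/utils.py | col_extract_colbin
-- ===== SOURCE A (Python) =====
-- from collections import OrderedDict
-- from collections import OrderedDict
--
-- def np_drop_duplicates(l1):
--   l0 = list( OrderedDict((x, True) for x in l1 ).keys())
--   return l0
--
-- def col_extract_colbin( cols2) :
--  coln = []
--  for ss in cols2 :
--   xr = ss[ss.rfind("_")+1:]
--   xl = ss[:ss.rfind("_")]
--   if len(xr) < 3 :  # -1 or 1
--     coln.append( xl )
--   else :
--     coln.append( ss )
--
--  coln = np_drop_duplicates(coln)
--  return coln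
-- ===== SOURCE B (Python) =====
-- def col_extract_colbin(cols2):
--     # Build the output back-to-front: walk cols2 in reverse, prepend each
--     # base name and filter later duplicates of it out of the partial result.
--     coln = []
--     for ss in reversed(cols2):
--         name = ss[:ss.rfind("_")] if len(ss[ss.rfind("_") + 1:]) < 3 else ss
--         coln = [name] + [x for x in coln if x != name]
--     return coln
-- ===== Notes on version B (the rewrite author's own statement) =====
-- stated objective: alternative
-- what changed: Replaces A's forward map-then-OrderedDict-dedup with a single reverse traversal that builds the result back-to-front, prepending each base name and filtering its later duplicates out of the partial result (no seen-structure, no second pass).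
import Mathlib
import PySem

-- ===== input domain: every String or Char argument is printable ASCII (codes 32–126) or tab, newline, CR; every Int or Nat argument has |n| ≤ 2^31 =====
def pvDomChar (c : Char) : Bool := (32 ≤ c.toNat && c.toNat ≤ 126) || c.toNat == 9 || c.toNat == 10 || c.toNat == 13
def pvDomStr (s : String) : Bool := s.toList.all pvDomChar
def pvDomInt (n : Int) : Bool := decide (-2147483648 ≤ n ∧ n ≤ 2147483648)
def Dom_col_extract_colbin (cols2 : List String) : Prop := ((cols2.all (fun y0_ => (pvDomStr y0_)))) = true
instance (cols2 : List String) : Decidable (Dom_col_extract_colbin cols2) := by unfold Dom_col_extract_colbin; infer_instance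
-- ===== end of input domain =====

-- B builds the deduplicated result back-to-front in one reverse traversal (prepend the
-- base name, filter its later duplicates out of the partial result), instead of A's
-- forward map followed by a separate OrderedDict dedup pass; same value, no speed claim.

-- ===== PORT A =====
def np_drop_duplicates (l1 : List String) : List String :=
  PySem.List.dedup l1   -- list(OrderedDict((x, True) for x in l1).keys()) = ordered dedup

def col_extract_colbin (cols2 : List String) : List String :=
  let coln : List String :=
    cols2.foldl (fun coln ss =>
      let xr := PySem.Str.slice ss (some (PySem.Str.rfind ss "_" + 1)) none
      let xl := PySem.Str.slice ss none (some (PySem.Str.rfind ss "_"))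
      if (PySem.Str.len xr : Int) < 3 then coln ++ [xl] else coln ++ [ss]) []
  np_drop_duplicates coln

-- ===== PORT B =====
def col_extract_colbin_alt (cols2 : List String) : List String :=
  cols2.reverse.foldl (fun coln ss =>
    let name :=
      if (PySem.Str.len (PySem.Str.slice ss (some (PySem.Str.rfind ss "_" + 1)) none) : Int) < 3
      then PySem.Str.slice ss none (some (PySem.Str.rfind ss "_")) else ss
    name :: coln.filter (fun x => x ≠ name)) []

-- ===== PRECONDITION & SPEC =====
def Spec_col_extract_colbin (cols2 : List String) (out : List String) : Prop := out = col_extract_colbin_alt cols2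
instance (cols2 : List String) (out : List String) : Decidable (Spec_col_extract_colbin cols2 out) := by unfold Spec_col_extract_colbin; infer_instance

-- ===== CLAIM (what is proved, stated in full; the proofs are below) =====
def Claim_equal_col_extract_colbin : Prop := ∀ (cols2 : List String), Dom_col_extract_colbin cols2 → Spec_col_extract_colbin cols2 (col_extract_colbin cols2)

-- ===== LEMMAS AND PROOFS =====

-- the per-column base name both programs compute
def pvName (ss : String) : String :=
  if (PySem.Str.len (PySem.Str.slice ss (some (PySem.Str.rfind ss "_" + 1)) none) : Int) < 3
  then PySem.Str.slice ss none (some (PySem.Str.rfind ss "_")) else ss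

theorem pv_foldA (cols2 : List String) (acc : List String) :
    cols2.foldl (fun coln ss =>
      let xr := PySem.Str.slice ss (some (PySem.Str.rfind ss "_" + 1)) none
      let xl := PySem.Str.slice ss none (some (PySem.Str.rfind ss "_"))
      if (PySem.Str.len xr : Int) < 3 then coln ++ [xl] else coln ++ [ss]) acc
    = acc ++ cols2.map pvName := by
  induction cols2 generalizing acc with
  | nil => simp
  | cons ss rest ih =>
    simp only [List.foldl_cons, List.map_cons, ih, pvName]
    split <;> simp

-- foldl of Set.add from an arbitrary set s, expressed through the run from []
theorem pv_add_from (l s : List String) :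
    l.foldl PySem.Set.add s
      = s ++ (l.foldl PySem.Set.add []).filter (fun x => decide (x ∉ s)) := by
  induction l generalizing s with
  | nil => simp
  | cons a l ih =>
    have hnil : PySem.Set.add ([] : List String) a = [a] := by
      simp [PySem.Set.add, PySem.Set.contains]
    rw [List.foldl_cons, List.foldl_cons, hnil, ih (PySem.Set.add s a), ih [a]]
    by_cases h : a ∈ s
    · have hadd : PySem.Set.add s a = s := by simp [PySem.Set.add, PySem.Set.contains, h]
      rw [hadd]
      simp only [List.filter_append, List.filter_filter]
      have h1 : ([a] : List String).filter (fun x => decide (x ∉ s)) = [] := by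
        simp [h]
      rw [h1]
      congr 1
      apply List.filter_congr
      intro x _
      by_cases hx : x ∈ s
      · simp [hx]
      · have : x ≠ a := fun he => hx (he ▸ h)
        simp [hx, this]
    · have hadd : PySem.Set.add s a = s ++ [a] := by
        simp [PySem.Set.add, PySem.Set.contains, h]
      rw [hadd]
      simp only [List.filter_append, List.filter_filter]
      have h1 : ([a] : List String).filter (fun x => decide (x ∉ s)) = [a] := by
        simp [h]
      rw [h1, List.append_assoc]
      congr 2
      apply List.filter_congr
      intro x _
      by_cases hx : x ∈ s
      · simp [hx]
      · by_cases hxa : x = a <;> simp [hx, hxa]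

-- ordered dedup peels its head: dedup (a :: l) = a :: (dedup l with a removed)
theorem pv_dedup_cons (a : String) (l : List String) :
    PySem.List.dedup (a :: l) = a :: (PySem.List.dedup l).filter (fun x => x ≠ a) := by
  have hnil : PySem.Set.add ([] : List String) a = [a] := by
    simp [PySem.Set.add, PySem.Set.contains]
  rw [PySem.List.dedup_eq_ofList, PySem.List.dedup_eq_ofList,
      PySem.Set.ofList_eq_foldl, PySem.Set.ofList_eq_foldl,
      List.foldl_cons, hnil, pv_add_from]
  simp only [List.singleton_append, List.cons.injEq, true_and]
  apply List.filter_congr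
  intro x _
  simp

-- B's reverse loop computes the ordered dedup of the mapped names
theorem pv_foldB (l : List String) :
    l.foldr (fun ss acc => pvName ss :: acc.filter (fun x => x ≠ pvName ss)) []
      = PySem.List.dedup (l.map pvName) := by
  induction l with
  | nil => simp [PySem.List.dedup_eq_ofList, PySem.Set.ofList_eq_foldl]
  | cons a l ih => rw [List.foldr_cons, ih, List.map_cons, pv_dedup_cons]

-- ===== VERDICT (by name: the statement is the Claim_ definition above) =====
theorem col_extract_colbin_spec : Claim_equal_col_extract_colbin := by
  intro cols2 _
  show col_extract_colbin cols2 = col_extract_colbin_alt cols2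
  unfold col_extract_colbin col_extract_colbin_alt np_drop_duplicates
  rw [pv_foldA, List.foldl_reverse]
  show PySem.List.dedup ([] ++ cols2.map pvName) = _
  rw [List.nil_append, ← pv_foldB cols2]
  rfl
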